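-- pv_equiv track=rewrite | github.com/KaggleBusters/SARS | VAIT_analysis_/raw_seq_utill.py | get_unique_values
-- ===== SOURCE A (Python) =====
-- def get_unique_values(input_dict):
--     unique_values = {}
--     for value in input_dict.values():
--         if value in unique_values:
--             unique_values[value] += 1
--         else:
--             unique_values[value] = 1
--     return unique_values
-- ===== SOURCE B (Python) =====
-- def get_unique_values(input_dict):
--     vals = list(input_dict.values())
--     return {v: vals.count(v) for v in dict.fromkeys(vals)}
-- ===== Notes on version B (the rewrite author's own statement) =====
-- stated objective: alternative
-- what changed: B keeps no running tally: it dedups the value list once (dict.fromkeys, preserving first-occurrence order) and counts each distinct value with a full-list vals.count scan, instead of A's single accumulating dict pass.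
import Mathlib
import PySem

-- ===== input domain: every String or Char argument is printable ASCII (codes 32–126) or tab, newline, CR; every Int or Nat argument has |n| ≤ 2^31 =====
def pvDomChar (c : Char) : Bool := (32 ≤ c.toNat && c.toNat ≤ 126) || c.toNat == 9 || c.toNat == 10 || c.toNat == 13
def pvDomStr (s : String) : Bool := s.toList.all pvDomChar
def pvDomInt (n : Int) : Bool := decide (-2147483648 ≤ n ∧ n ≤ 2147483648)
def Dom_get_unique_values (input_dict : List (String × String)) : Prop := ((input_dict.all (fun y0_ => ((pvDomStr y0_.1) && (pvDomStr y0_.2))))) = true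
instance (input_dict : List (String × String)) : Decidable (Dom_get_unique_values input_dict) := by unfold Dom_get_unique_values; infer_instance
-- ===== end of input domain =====

-- B replaces A's single accumulating counter pass by an order-preserving dedup of the
-- value list followed by a full-list count per distinct value (alternative decomposition).

-- ===== PORT A =====
-- A: one pass over input_dict.values(), maintaining a running tally dict.
def get_unique_values (input_dict : List (String × String)) : List (String × Int) :=
  (input_dict.foldl
    (fun unique_values p =>
      let value := p.2
      if unique_values.contains value then
        unique_values.insert value (unique_values.getD value 0 + 1)
      else
        unique_values.insert value 1)
    PySem.Dict.empty).items

-- ===== PORT B =====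
-- B: dedup the value list (dict.fromkeys order), then count each distinct value over the full list.
def get_unique_values_alt (input_dict : List (String × String)) : List (String × Int) :=
  let vals := input_dict.map (·.2)
  (PySem.List.dedup vals).map (fun v => (v, (vals.count v : Int)))

-- ===== PRECONDITION & SPEC =====
def Spec_get_unique_values (input_dict : List (String × String)) (out : List (String × Int)) : Prop := out = get_unique_values_alt input_dict
instance (input_dict : List (String × String)) (out : List (String × Int)) : Decidable (Spec_get_unique_values input_dict out) := by unfold Spec_get_unique_values; infer_instance

-- ===== CLAIM (what is proved, stated in full; the proofs are below) =====
def Claim_equal_get_unique_values : Prop := ∀ (input_dict : List (String × String)), Dom_get_unique_values input_dict → Spec_get_unique_values input_dict (get_unique_values input_dict)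

-- ===== LEMMAS AND PROOFS =====

-- A's branchy step equals the unconditional 'insert v (getD v 0 + 1)' step:
-- when v is absent, getD v 0 = 0.
theorem pv_step_eq (d : PySem.Dict String Int) (v : String) :
    (if d.contains v then d.insert v (d.getD v 0 + 1) else d.insert v 1)
      = d.insert v (d.getD v 0 + 1) := by
  by_cases h : d.contains v = true
  · simp [h]
  · simp only [Bool.not_eq_true] at h
    simp [h, PySem.Dict.getD_of_not_contains d 0 h]

theorem pv_foldl_eq (l : List (String × String)) (d : PySem.Dict String Int) :
    l.foldl
        (fun unique_values p =>
          let value := p.2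
          if unique_values.contains value then
            unique_values.insert value (unique_values.getD value 0 + 1)
          else
            unique_values.insert value 1) d
      = (l.map (·.2)).foldl (fun d v => d.insert v (d.getD v 0 + 1)) d := by
  induction l generalizing d with
  | nil => rfl
  | cons x xs ih =>
    simp only [List.foldl_cons, List.map_cons]
    rw [pv_step_eq]
    exact ih _

-- ===== VERDICT (by name: the statement is the Claim_ definition above) =====
theorem get_unique_values_spec : Claim_equal_get_unique_values := by
  intro input_dict _
  unfold Spec_get_unique_values get_unique_values get_unique_values_alt
  rw [pv_foldl_eq, PySem.Dict.foldl_insert_getD_add_one_eq_counter,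
      PySem.Dict.items_counter]
  simp [PySem.List.dedup_eq_ofList]
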